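-- pv_equiv track=rewrite | github.com/mgsrood/aardg_monta | shipped_orders_update/modules/labels.py | calculate_shipping_labels
-- ===== SOURCE A (Python) =====
-- def calculate_shipping_labels(package_count, mailbox_count):
--     labels = 0
--
--     # Gebruik eerst de 3 omdoos
--     while package_count >= 3:
--         labels += 1
--         package_count -= 3
--         mailbox_count = 0
--
--     # Gebruik dan de 2 omdoos
--     while package_count >= 2:
--         labels += 1
--         package_count -= 2
--         mailbox_count = 0
--
--     # Verwerk de overige dozen en, als
--     if package_count > 0:
--         labels += 1
--         package_count = 0
--         mailbox_count = 0  # All mailbox packages fit into the package box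
--
--     # Use the 2-mailbox boxes for remaining mailbox packages
--     while mailbox_count >= 2:
--         labels += 1
--         mailbox_count -= 2
--
--     # Handle remaining mailbox packages
--     if mailbox_count > 0:
--         labels += 1
--
--     return labels
-- ===== SOURCE B (Python) =====
-- def calculate_shipping_labels(package_count, mailbox_count):
--     # O(1): any package box (3-, 2- or 1-capacity) absorbs all mailbox items,
--     # so labels = ceil(package_count / 3) when there are packages, else
--     # ceil(mailbox_count / 2) boxes of two mailbox items.
--     if package_count > 0:
--         return -(-package_count // 3)
--     if mailbox_count > 0:
--         return -(-mailbox_count // 2)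
--     return 0
-- ===== Notes on version B (the rewrite author's own statement) =====
-- stated objective: faster
-- what changed: Replaced the three subtraction while-loops with a closed-form ceiling-division formula (ceil(p/3) if any packages, else ceil(m/2)).
import Mathlib
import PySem

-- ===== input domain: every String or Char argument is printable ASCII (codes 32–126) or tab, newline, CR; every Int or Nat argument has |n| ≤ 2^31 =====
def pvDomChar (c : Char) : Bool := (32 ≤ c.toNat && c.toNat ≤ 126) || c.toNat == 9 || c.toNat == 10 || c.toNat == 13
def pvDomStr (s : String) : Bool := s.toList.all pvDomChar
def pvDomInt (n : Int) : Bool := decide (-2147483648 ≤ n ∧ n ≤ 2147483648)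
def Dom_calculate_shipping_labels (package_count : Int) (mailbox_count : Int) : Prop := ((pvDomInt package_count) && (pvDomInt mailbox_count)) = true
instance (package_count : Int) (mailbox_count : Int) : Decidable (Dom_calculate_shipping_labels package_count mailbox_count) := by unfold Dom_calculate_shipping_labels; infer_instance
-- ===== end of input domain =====

-- B replaces A's subtraction loops with closed-form ceiling division (faster: O(1) vs O(n)).

-- ===== PORT A =====
-- while package_count >= 3: labels += 1; package_count -= 3; mailbox_count = 0
def pvLoop3 (labels package_count mailbox_count : Int) : Int × Int × Int :=
  if _h : package_count ≥ 3 then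
    pvLoop3 (labels + 1) (package_count - 3) 0
  else (labels, package_count, mailbox_count)
termination_by package_count.toNat
decreasing_by omega

-- while package_count >= 2: labels += 1; package_count -= 2; mailbox_count = 0
def pvLoop2 (labels package_count mailbox_count : Int) : Int × Int × Int :=
  if _h : package_count ≥ 2 then
    pvLoop2 (labels + 1) (package_count - 2) 0
  else (labels, package_count, mailbox_count)
termination_by package_count.toNat
decreasing_by omega

-- while mailbox_count >= 2: labels += 1; mailbox_count -= 2
def pvLoopMb (labels mailbox_count : Int) : Int × Int :=
  if _h : mailbox_count ≥ 2 then
    pvLoopMb (labels + 1) (mailbox_count - 2)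
  else (labels, mailbox_count)
termination_by mailbox_count.toNat
decreasing_by omega

def calculate_shipping_labels (package_count : Int) (mailbox_count : Int) : Int :=
  let s1 := pvLoop3 0 package_count mailbox_count
  let s2 := pvLoop2 s1.1 s1.2.1 s1.2.2
  let s3 := if s2.2.1 > 0 then (s2.1 + 1, (0 : Int), (0 : Int)) else s2
  let s4 := pvLoopMb s3.1 s3.2.2
  if s4.2 > 0 then s4.1 + 1 else s4.1

-- ===== PORT B =====
def calculate_shipping_labels_alt (package_count : Int) (mailbox_count : Int) : Int :=
  if package_count > 0 then -(PySem.Int.floordiv (-package_count) 3)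
  else if mailbox_count > 0 then -(PySem.Int.floordiv (-mailbox_count) 2)
  else 0

-- ===== PRECONDITION & SPEC =====
def Spec_calculate_shipping_labels (package_count : Int) (mailbox_count : Int) (out : Int) : Prop := out = calculate_shipping_labels_alt package_count mailbox_count
instance (package_count : Int) (mailbox_count : Int) (out : Int) : Decidable (Spec_calculate_shipping_labels package_count mailbox_count out) := by unfold Spec_calculate_shipping_labels; infer_instance

-- ===== CLAIM (what is proved, stated in full; the proofs are below) =====
def Claim_equal_calculate_shipping_labels : Prop := ∀ (package_count : Int) (mailbox_count : Int), Dom_calculate_shipping_labels package_count mailbox_count → Spec_calculate_shipping_labels package_count mailbox_count (calculate_shipping_labels package_count mailbox_count)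

-- ===== LEMMAS AND PROOFS =====

-- ceiling division in B, expressed with Euclidean division for omega
lemma alt_ceil3 (p : Int) :
    -(PySem.Int.floordiv (-p) 3) = -((-p) / 3) := by
  rw [PySem.Int.floordiv_eq_ediv_of_pos (by norm_num)]

lemma alt_ceil2 (m : Int) :
    -(PySem.Int.floordiv (-m) 2) = -((-m) / 2) := by
  rw [PySem.Int.floordiv_eq_ediv_of_pos (by norm_num)]

-- closed form for the 3-loop: it runs (p - p%3)/3 times when p ≥ 3
lemma pvLoop3_closed : ∀ (n : Nat) (l p m : Int), p.toNat ≤ n →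
    pvLoop3 l p m = if p ≥ 3 then (l + p / 3, p % 3, 0) else (l, p, m) := by
  intro n
  induction n with
  | zero =>
    intro l p m h
    rw [pvLoop3]
    have : ¬ p ≥ 3 := by omega
    simp [this]
  | succ k ih =>
    intro l p m h
    rw [pvLoop3]
    by_cases h3 : p ≥ 3
    · rw [ih (l + 1) (p - 3) 0 (by omega)]
      by_cases h6 : p - 3 ≥ 3 <;> simp [h6, h3, Prod.ext_iff] <;> omega
    · simp [h3]

-- closed form for the 2-loop when its input p is already < 3
lemma pvLoop2_small (l p m : Int) (h : p < 3) :
    pvLoop2 l p m = if p ≥ 2 then (l + 1, p - 2, 0) else (l, p, m) := by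
  by_cases h2 : p ≥ 2
  · rw [pvLoop2]
    simp [h2]
    rw [pvLoop2]
    have : ¬ p - 2 ≥ 2 := by omega
    simp [this]
  · rw [pvLoop2]; simp [h2]

-- mailbox stage: loop then final +1 equals ceil(m/2) for m > 0, else l
lemma pvLoopMb_closed : ∀ (n : Nat) (l m : Int), m.toNat ≤ n →
    (if (pvLoopMb l m).2 > 0 then (pvLoopMb l m).1 + 1 else (pvLoopMb l m).1)
      = if m > 0 then l + -((-m) / 2) else l := by
  intro n
  induction n with
  | zero =>
    intro l m h
    rw [pvLoopMb]
    have h2 : ¬ m ≥ 2 := by omega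
    simp only [h2, dite_false]
    by_cases hm : m > 0 <;> simp [hm] <;> omega
  | succ k ih =>
    intro l m h
    rw [pvLoopMb]
    by_cases h2 : m ≥ 2
    · simp only [h2, dite_true]
      rw [ih (l + 1) (m - 2) (by omega)]
      have hm : m > 0 := by omega
      by_cases hm2 : m - 2 > 0 <;> simp [hm] <;> omega
    · simp only [h2, dite_false]
      by_cases hm : m > 0 <;> simp [hm] <;> omega

-- ===== VERDICT (by name: the statement is the Claim_ definition above) =====
theorem calculate_shipping_labels_spec : Claim_equal_calculate_shipping_labels := by
  intro p m _
  show calculate_shipping_labels p m = calculate_shipping_labels_alt p m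
  unfold calculate_shipping_labels calculate_shipping_labels_alt
  rw [pvLoop3_closed p.toNat 0 p m (le_refl _)]
  by_cases hp : p > 0
  · rw [alt_ceil3 p]
    by_cases h3 : p ≥ 3
    · simp only [h3, if_true]
      rw [pvLoop2_small _ _ _ (by omega)]
      by_cases h2 : p % 3 ≥ 2
      · simp only [h2, if_true]
        have hz : ¬ ((p % 3 - 2 : Int) > 0) := by omega
        simp only [hz, if_false]
        rw [pvLoopMb]
        have : ¬ (0 : Int) ≥ 2 := by norm_num
        simp only [this, dite_false]
        simp only [hp, if_true]
        norm_num
        omega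
      · simp only [h2, if_false]
        by_cases h1 : p % 3 > 0
        · simp only [h1, if_true]
          rw [pvLoopMb]
          have : ¬ (0 : Int) ≥ 2 := by norm_num
          simp only [this, dite_false]
          simp only [hp, if_true]
          norm_num
          omega
        · simp only [h1, if_false]
          rw [pvLoopMb_closed (0:Int).toNat _ 0 (le_refl _)]
          norm_num
          simp only [hp, if_true]
          omega
    · simp only [h3, if_false]
      rw [pvLoop2_small _ _ _ (by omega)]
      by_cases h2 : p ≥ 2
      · simp only [h2, if_true]
        have hz : ¬ ((p - 2 : Int) > 0) := by omega
        simp only [hz, if_false]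
        rw [pvLoopMb]
        have : ¬ (0 : Int) ≥ 2 := by norm_num
        simp only [this, dite_false]
        simp only [hp, if_true]
        norm_num
        omega
      · simp only [h2, if_false]
        simp only [hp, if_true]
        rw [pvLoopMb]
        have : ¬ (0 : Int) ≥ 2 := by norm_num
        simp only [this, dite_false]
        norm_num
        omega
  · have h3 : ¬ p ≥ 3 := by omega
    have h2 : ¬ p ≥ 2 := by omega
    simp only [h3, if_false]
    rw [pvLoop2_small _ _ _ (by omega)]
    simp only [h2, if_false, hp, if_false]
    rw [pvLoopMb_closed m.toNat 0 m (le_refl _)]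
    by_cases hm : m > 0
    · rw [alt_ceil2 m]; simp [hm]
    · simp [hm]
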